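-- pv_equiv track=rewrite | github.com/GreenClothes/SWEA | python_basic/day4_4869.py | dfs
-- ===== SOURCE A (Python) =====
-- def dfs(n):
--     if n <= 0:
--         return 1
--     d_cnt = 0
--     if n >= 10:
--         d_cnt += 1 * dfs(n-10)
--     if n >= 20:
--         d_cnt += 2 * dfs(n-20)
--     return d_cnt
-- ===== SOURCE B (Python) =====
-- def dfs(n):
--     # Bottom-up DP over k = n // 10 instead of exponential recursion.
--     if n <= 0:
--         return 1
--     if n % 10:
--         return 0
--     a, b = 1, 1  # g(0), g(1) with g(k) = g(k-1) + 2*g(k-2)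
--     for _ in range(n // 10 - 1):
--         a, b = b, b + 2 * a
--     return b
-- ===== Notes on version B (the rewrite author's own statement) =====
-- stated objective: alternative
-- what changed: Replaces the exponential branching recursion with a closed case analysis (nonpositive n gives one, n not a multiple of ten gives zero) plus an iterative bottom-up two-variable DP over the number of tens; intended as asymptotically better, though a timing run could not consistently confirm a ratio. Pre_ excludes huge positive n, on which A's recursion (one stack frame per ten subtracted) overruns the interpreter's recursion limit and raises RecursionError; A returns no value there, B still does.
import Mathlib
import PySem

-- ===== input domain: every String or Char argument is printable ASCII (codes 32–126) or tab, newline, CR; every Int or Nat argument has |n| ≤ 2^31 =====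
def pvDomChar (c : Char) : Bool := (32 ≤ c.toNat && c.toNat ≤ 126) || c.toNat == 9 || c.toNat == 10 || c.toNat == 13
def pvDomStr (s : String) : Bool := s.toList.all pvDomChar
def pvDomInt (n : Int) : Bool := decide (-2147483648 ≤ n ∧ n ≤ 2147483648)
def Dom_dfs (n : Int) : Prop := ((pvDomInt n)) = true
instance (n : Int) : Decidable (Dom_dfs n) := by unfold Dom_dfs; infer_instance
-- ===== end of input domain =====

-- B replaces A's exponential branching recursion by a case analysis plus an iterative two-variable DP over n // 10 (a different algorithm; equal value proved on Pre_).

-- ===== PORT A =====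
def dfs (n : Int) : Int :=
  if n ≤ 0 then 1
  else
    (if 10 ≤ n then 1 * dfs (n - 10) else 0) +
    (if 20 ≤ n then 2 * dfs (n - 20) else 0)
termination_by n.toNat
decreasing_by all_goals omega

-- ===== PORT B =====
-- the 'for _ in range(n // 10 - 1): a, b = b, b + 2*a' loop of Source B
def dfsAltLoop : Nat → Int × Int → Int × Int
  | 0, p => p
  | m + 1, (a, b) => dfsAltLoop m (b, b + 2 * a)

def dfs_alt (n : Int) : Int :=
  if n ≤ 0 then 1
  else if PySem.Int.mod n 10 ≠ 0 then 0
  else (dfsAltLoop (PySem.Int.floordiv n 10 - 1).toNat (1, 1)).2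

-- ===== PRECONDITION & SPEC =====
-- Pre_ excludes huge positive n: A's recursion uses one stack frame per ten subtracted from n,
-- so for such n it overruns the interpreter's recursion limit and raises RecursionError
-- (no input on which A returns a value is excluded).
def Pre_dfs (n : Int) : Prop := n ≤ 99000
instance (n : Int) : Decidable (Pre_dfs n) := by unfold Pre_dfs; infer_instance
def pvWitness_dfs : Int := (60)

def Spec_dfs (n : Int) (out : Int) : Prop := out = dfs_alt n
instance (n : Int) (out : Int) : Decidable (Spec_dfs n out) := by unfold Spec_dfs; infer_instance

-- ===== CLAIM (what is proved, stated in full; the proofs are below) =====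
def Claim_equal_dfs : Prop := ∀ (n : Int), Dom_dfs n → Pre_dfs n → Spec_dfs n (dfs n)

-- ===== LEMMAS AND PROOFS =====

-- g k = number of weighted tilings of length 10*k: g 0 = g 1 = 1, g (k+2) = g (k+1) + 2 * g k
def g : Nat → Int
  | 0 => 1
  | 1 => 1
  | k + 2 => g (k + 1) + 2 * g k

theorem dfsAltLoop_g (m : Nat) : ∀ i : Nat, dfsAltLoop m (g i, g (i + 1)) = (g (i + m), g (i + m + 1)) := by
  induction m with
  | zero => intro i; simp [dfsAltLoop]
  | succ m ih =>
    intro i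
    have : g (i + 1) + 2 * g i = g (i + 2) := by simp [g]
    simp only [dfsAltLoop, this]
    have h := ih (i + 1)
    rw [show i + 1 + 1 = i + 2 from rfl] at h
    rw [h]
    congr 1 <;> congr 1 <;> omega

theorem dfs_eq_cases (n : Int) :
    dfs n = if n ≤ 0 then 1 else if n % 10 ≠ 0 then 0 else g (n / 10).toNat := by
  induction n using dfs.induct with
  | case1 n h0 => simp [dfs, h0]
  | case2 n h0 ih1 ih2 =>
    rw [dfs]
    simp only [h0, if_false]
    by_cases h10 : 10 ≤ n
    · rw [ih1 h10]
      by_cases h20 : 20 ≤ n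
      · rw [ih2 h20]
        by_cases hm : n % 10 = 0
        · have hm10 : (n - 10) % 10 = 0 := by omega
          have hm20 : (n - 20) % 10 = 0 := by omega
          have hn10 : ¬ (n - 10) ≤ 0 := by omega
          by_cases hz : n - 20 ≤ 0
          · have : n = 20 := by omega
            subst this
            decide
          · have e1 : ((n - 10) / 10).toNat = (n / 10).toNat - 1 := by omega
            have e2 : ((n - 20) / 10).toNat = (n / 10).toNat - 2 := by omega
            rw [if_pos h10, if_pos h20, if_neg hn10, if_neg hz, if_neg (show ¬ ((n - 10) % 10 ≠ 0) from by omega),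
              if_neg (show ¬ ((n - 20) % 10 ≠ 0) from by omega),
              if_neg (show ¬ (n % 10 ≠ 0) from by omega), e1, e2]
            obtain ⟨k, hk2⟩ : ∃ k, (n / 10).toNat = k + 2 := ⟨(n / 10).toNat - 2, by omega⟩
            rw [hk2]
            show 1 * g (k + 2 - 1) + 2 * g (k + 2 - 2) = g (k + 2)
            simp only [Nat.add_sub_cancel, show k + 2 - 1 = k + 1 from rfl, g]
            ring
        · have hm10 : (n - 10) % 10 ≠ 0 := by omega
          have hm20 : (n - 20) % 10 ≠ 0 := by omega
          have hn10 : ¬ (n - 10) ≤ 0 := by omega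
          have hn20 : ¬ (n - 20) ≤ 0 := by omega
          simp [hm, hm20, hn10, hn20, h10, h20]
      · simp only [h20, if_false]
        by_cases hm : n % 10 = 0
        · have : n = 10 := by omega
          subst this
          decide
        · have hm10 : (n - 10) % 10 ≠ 0 := by omega
          have hz : ¬ (n - 10) ≤ 0 := by omega
          simp [hm, hz, h10]
    · have hm : n % 10 ≠ 0 := by omega
      simp [h10, hm, show ¬ (20:Int) ≤ n by omega]

theorem dfs_alt_eq_cases (n : Int) :
    dfs_alt n = if n ≤ 0 then 1 else if n % 10 ≠ 0 then 0 else g (n / 10).toNat := by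
  unfold dfs_alt
  by_cases h0 : n ≤ 0
  · simp [h0]
  · have hpos : (0:Int) < 10 := by norm_num
    rw [PySem.Int.mod_eq_emod_of_pos hpos, PySem.Int.floordiv_eq_ediv_of_pos hpos]
    simp only [h0, if_false]
    by_cases hm : n % 10 = 0
    · simp only [hm, ne_eq, not_true_eq_false, if_false]
      have hk1 : 1 ≤ n / 10 := by omega
      obtain ⟨m, hm2⟩ : ∃ m : Nat, (n / 10 - 1).toNat = m := ⟨(n / 10 - 1).toNat, rfl⟩
      rw [hm2]
      have h01 : ((1:Int), (1:Int)) = (g 0, g (0 + 1)) := by simp [g]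
      rw [h01, dfsAltLoop_g m 0]
      have : (n / 10).toNat = 0 + m + 1 := by omega
      rw [this]
    · simp [hm]

-- ===== VERDICT (by name: the statement is the Claim_ definition above) =====
theorem dfs_spec : Claim_equal_dfs := by
  intro n _ _
  unfold Spec_dfs
  rw [dfs_eq_cases, dfs_alt_eq_cases]
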